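-- pv_equiv track=rewrite | github.com/caihaodong111/robot | backend/robots/robot_config_sync.py | _split_csv_paths
-- ===== SOURCE A (Python) =====
-- def _split_csv_paths(value) -> list:
--     if not value:
--         return []
--     if isinstance(value, (list, tuple)):
--         return [str(item).strip() for item in value if str(item).strip()]
--     parts = []
--     for raw in str(value).replace("\n", ";").split(";"):
--         parts.extend(raw.split(","))
--     return [item.strip() for item in parts if item.strip()]
-- ===== SOURCE B (Python) =====
-- def _split_csv_paths(value) -> list:
--     if not value:
--         return []
--     if isinstance(value, (list, tuple)):
--         return [str(item).strip() for item in value if str(item).strip()]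
--     parts = []
--     buf = []
--     for ch in str(value):
--         if ch in "\n;,":
--             parts.append("".join(buf))
--             buf = []
--         else:
--             buf.append(ch)
--     parts.append("".join(buf))
--     return [p.strip() for p in parts if p.strip()]
-- ===== Notes on version B (the rewrite author's own statement) =====
-- stated objective: alternative
-- what changed: Replaced the staged replace-newlines-with-semicolons + split-on-semicolon + inner split-on-comma pipeline with a single left-to-right character scan that cuts a token at every separator character in one pass, then strips and filters the tokens.
import Mathlib
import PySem

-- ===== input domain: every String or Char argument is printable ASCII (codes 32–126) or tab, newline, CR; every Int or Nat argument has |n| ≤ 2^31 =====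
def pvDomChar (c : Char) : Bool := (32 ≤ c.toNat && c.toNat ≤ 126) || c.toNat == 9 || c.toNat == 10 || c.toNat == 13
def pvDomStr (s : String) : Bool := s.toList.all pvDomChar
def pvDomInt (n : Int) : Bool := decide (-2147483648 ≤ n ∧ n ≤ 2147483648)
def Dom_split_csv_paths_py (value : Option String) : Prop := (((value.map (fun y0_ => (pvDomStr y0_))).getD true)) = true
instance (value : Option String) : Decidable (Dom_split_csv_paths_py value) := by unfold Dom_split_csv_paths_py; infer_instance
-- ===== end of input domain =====

-- B replaces A's replace+split(';')+split(',') staging by one single-pass character scan; same cost, different traversal.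

-- ===== PORT A =====
-- literal port of A: guard falsy value, replace '\n' by ';', split on ';', extend with each piece's
-- split on ',', then keep the non-empty stripped items (strings handled via PySem.Chars on .toList)
def split_csv_paths_py (value : Option String) : List String :=
  match value with
  | none => []
  | some s =>
    if s = "" then []
    else
      let parts : List (List Char) :=
        (PySem.Chars.splitOn (PySem.Chars.replace s.toList ['\n'] [';']) [';']).foldl
          (fun acc raw => acc ++ PySem.Chars.splitOn raw [',']) []
      (parts.filter (fun item => !(PySem.Chars.strip item).isEmpty)).map
        (fun item => String.ofList (PySem.Chars.strip item))

-- ===== PORT B =====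
-- literal port of B: one scan over the characters, cutting a token at each of '\n', ';', ','
def split_csv_paths_py_alt (value : Option String) : List String :=
  match value with
  | none => []
  | some s =>
    if s = "" then []
    else
      let st := s.toList.foldl
        (fun (st : List (List Char) × List Char) ch =>
          if ch = '\n' ∨ ch = ';' ∨ ch = ',' then (st.1 ++ [st.2], ([] : List Char))
          else (st.1, st.2 ++ [ch])) ([], [])
      let parts := st.1 ++ [st.2]
      (parts.filter (fun p => !(PySem.Chars.strip p).isEmpty)).map
        (fun p => String.ofList (PySem.Chars.strip p))

-- ===== PRECONDITION & SPEC =====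
def Spec_split_csv_paths_py (value : Option String) (out : List String) : Prop := out = split_csv_paths_py_alt value
instance (value : Option String) (out : List String) : Decidable (Spec_split_csv_paths_py value out) := by unfold Spec_split_csv_paths_py; infer_instance

-- ===== CLAIM (what is proved, stated in full; the proofs are below) =====
def Claim_equal_split_csv_paths_py : Prop := ∀ (value : Option String), Dom_split_csv_paths_py value → Spec_split_csv_paths_py value (split_csv_paths_py value)

-- ===== LEMMAS AND PROOFS =====

-- apply f to the head piece only
def pvMapHead (f : List Char → List Char) : List (List Char) → List (List Char)
  | [] => []
  | p :: ps => f p :: ps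

-- split on a single character (the simple structural recursion both ports are reduced to)
def pvSplit1 (a : Char) : List Char → List (List Char)
  | [] => [[]]
  | c :: cs => if c = a then [] :: pvSplit1 a cs else pvMapHead (c :: ·) (pvSplit1 a cs)

-- split on any of '\n', ';', ',' — the common normal form of both parts lists
def pvSplitB : List Char → List (List Char)
  | [] => [[]]
  | c :: cs => if c = '\n' ∨ c = ';' ∨ c = ',' then [] :: pvSplitB cs else pvMapHead (c :: ·) (pvSplitB cs)

def pvSubst (c : Char) : Char := if c = '\n' then ';' else c

theorem pvSplit1_ne_nil (a : Char) (l : List Char) : pvSplit1 a l ≠ [] := by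
  induction l with
  | nil => simp [pvSplit1]
  | cons c cs ih =>
    simp only [pvSplit1]
    split_ifs
    · simp
    · cases h : pvSplit1 a cs with
      | nil => exact absurd h ih
      | cons p ps => simp [pvMapHead]

theorem pvSplitB_ne_nil (l : List Char) : pvSplitB l ≠ [] := by
  induction l with
  | nil => simp [pvSplitB]
  | cons c cs ih =>
    simp only [pvSplitB]
    split_ifs
    · simp
    · cases h : pvSplitB cs with
      | nil => exact absurd h ih
      | cons p ps => simp [pvMapHead]

theorem pvMapHead_id (ps : List (List Char)) : pvMapHead (fun p => p) ps = ps := by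
  cases ps <;> simp [pvMapHead]

theorem pvMapHead_comp (f g : List Char → List Char) (ps : List (List Char)) :
    pvMapHead f (pvMapHead g ps) = pvMapHead (fun p => f (g p)) ps := by
  cases ps <;> simp [pvMapHead]

theorem pvSplitOn_go_spec (a : Char) :
    ∀ (fuel : Nat) (l cur : List Char) (acc : List (List Char)), l.length ≤ fuel →
      PySem.Chars.splitOn.go [a] fuel l cur acc
        = acc.reverse ++ pvMapHead (fun p => cur.reverse ++ p) (pvSplit1 a l) := by
  intro fuel
  induction fuel with
  | zero =>
    intro l cur acc h
    have : l = [] := List.length_eq_zero_iff.mp (Nat.le_zero.mp h)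
    subst this
    simp [PySem.Chars.splitOn.go, pvSplit1, pvMapHead]
  | succ n ih =>
    intro l cur acc h
    cases l with
    | nil => simp [PySem.Chars.splitOn.go, pvSplit1, pvMapHead]
    | cons c rest =>
      simp only [PySem.Chars.splitOn.go]
      by_cases hca : c = a
      · subst hca
        have hpre : List.isPrefixOf [c] (c :: rest) = true := by
          simp [List.isPrefixOf]
        rw [if_pos hpre]
        have := ih rest [] (cur.reverse :: acc) (by simpa using Nat.le_of_succ_le_succ h)
        simp only [List.length_cons, List.length_nil, List.drop_succ_cons, List.drop_zero] at this ⊢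
        rw [this]
        simp only [pvSplit1, if_pos rfl, pvMapHead, List.reverse_cons, List.reverse_nil,
          List.nil_append, List.append_assoc, List.cons_append]
        cases pvSplit1 c rest <;> simp [pvMapHead]
      · have hpre : List.isPrefixOf [a] (c :: rest) = false := by
          simp [List.isPrefixOf]
          intro hc; exact absurd hc.symm hca
        rw [if_neg (by simp [hpre])]
        have := ih rest (c :: cur) acc (by simpa using Nat.le_of_succ_le_succ h)
        rw [this]
        simp only [pvSplit1, if_neg hca, pvMapHead_comp]
        congr 1
        cases hps : pvSplit1 a rest with
        | nil => exact absurd hps (pvSplit1_ne_nil a rest)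
        | cons p ps => simp [pvMapHead]

theorem pvSplitOn_eq (a : Char) (l : List Char) :
    PySem.Chars.splitOn l [a] = pvSplit1 a l := by
  unfold PySem.Chars.splitOn
  rw [pvSplitOn_go_spec a (l.length + 1) l [] [] (Nat.le_succ _)]
  simp [pvMapHead_id]

theorem pvReplace_go_spec :
    ∀ (fuel : Nat) (l acc : List Char), l.length ≤ fuel →
      PySem.Chars.replace.go ['\n'] [';'] fuel l acc = acc.reverse ++ l.map pvSubst := by
  intro fuel
  induction fuel with
  | zero =>
    intro l acc h
    have : l = [] := List.length_eq_zero_iff.mp (Nat.le_zero.mp h)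
    subst this
    simp [PySem.Chars.replace.go]
  | succ n ih =>
    intro l acc h
    cases l with
    | nil => simp [PySem.Chars.replace.go]
    | cons c rest =>
      simp only [PySem.Chars.replace.go]
      by_cases hc : c = '\n'
      · subst hc
        have hpre : List.isPrefixOf ['\n'] ('\n' :: rest) = true := by
          simp [List.isPrefixOf]
        rw [if_pos hpre]
        have := ih rest ([';'].reverse ++ acc) (by simpa using Nat.le_of_succ_le_succ h)
        simp only [List.length_cons, List.length_nil, List.drop_succ_cons, List.drop_zero] at this ⊢
        rw [this]
        simp [pvSubst]
      · have hpre : List.isPrefixOf ['\n'] (c :: rest) = false := by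
          simp [List.isPrefixOf]
          intro hcc; exact absurd hcc.symm hc
        rw [if_neg (by simp [hpre])]
        have := ih rest (c :: acc) (by simpa using Nat.le_of_succ_le_succ h)
        rw [this]
        simp [pvSubst, hc]

theorem pvReplace_eq (l : List Char) :
    PySem.Chars.replace l ['\n'] [';'] = l.map pvSubst := by
  unfold PySem.Chars.replace
  simp only [List.isEmpty_cons, if_neg]
  exact pvReplace_go_spec l.length l [] (le_refl _)

-- the flatMap of comma-splits over the semicolon-splits of the substituted string is the one-pass split
theorem pvFlat_eq (l : List Char) :
    (pvSplit1 ';' (l.map pvSubst)).flatMap (pvSplit1 ',') = pvSplitB l := by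
  induction l with
  | nil => simp [pvSplit1, pvSplitB]
  | cons c cs ih =>
    simp only [List.map_cons]
    by_cases h1 : pvSubst c = ';'
    · have hc : c = '\n' ∨ c = ';' ∨ c = ',' := by
        by_cases hn : c = '\n'
        · exact Or.inl hn
        · simp [pvSubst, hn] at h1; exact Or.inr (Or.inl h1)
      simp only [pvSplit1, if_pos h1, List.flatMap_cons, pvSplitB, if_pos hc, ih]
      simp [pvSplit1]
    · have hn : c ≠ '\n' := by intro hc; simp [pvSubst, hc] at h1
      have hsub : pvSubst c = c := by simp [pvSubst, hn]
      rw [hsub] at h1 ⊢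
      simp only [pvSplit1, if_neg h1]
      cases hps : pvSplit1 ';' (cs.map pvSubst) with
      | nil => exact absurd hps (pvSplit1_ne_nil _ _)
      | cons p ps =>
        rw [hps] at ih
        simp only [List.flatMap_cons] at ih
        by_cases hcm : c = ','
        · subst hcm
          simp only [pvMapHead, List.flatMap_cons, pvSplit1, if_pos rfl]
          simp only [pvSplitB, if_pos (Or.inr (Or.inr rfl))]
          simp [← ih]
        · have hcb : ¬ (c = '\n' ∨ c = ';' ∨ c = ',') := by
            rintro (h | h | h) <;> [exact hn h; exact h1 h; exact hcm h]
          simp only [pvMapHead, List.flatMap_cons, pvSplitB, if_neg hcb]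
          simp only [pvSplit1, if_neg hcm]
          rw [← ih]
          cases hq : pvSplit1 ',' p with
          | nil => exact absurd hq (pvSplit1_ne_nil _ _)
          | cons q qs => simp [pvMapHead]

-- B's scan: the accumulated parts plus the open buffer are the one-pass split
theorem pvScan_spec :
    ∀ (l : List Char) (parts : List (List Char)) (buf : List Char),
      (l.foldl (fun (st : List (List Char) × List Char) ch =>
          if ch = '\n' ∨ ch = ';' ∨ ch = ',' then (st.1 ++ [st.2], ([] : List Char))
          else (st.1, st.2 ++ [ch])) (parts, buf)).1
        ++ [(l.foldl (fun (st : List (List Char) × List Char) ch =>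
          if ch = '\n' ∨ ch = ';' ∨ ch = ',' then (st.1 ++ [st.2], ([] : List Char))
          else (st.1, st.2 ++ [ch])) (parts, buf)).2]
        = parts ++ pvMapHead (fun p => buf ++ p) (pvSplitB l) := by
  intro l
  induction l with
  | nil => intro parts buf; simp [pvSplitB, pvMapHead]
  | cons c cs ih =>
    intro parts buf
    simp only [List.foldl_cons]
    by_cases hc : c = '\n' ∨ c = ';' ∨ c = ','
    · rw [if_pos hc]
      rw [ih (parts ++ [buf]) []]
      simp only [pvSplitB, if_pos hc, pvMapHead]
      cases hps : pvSplitB cs with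
      | nil => exact absurd hps (pvSplitB_ne_nil cs)
      | cons p ps => simp [pvMapHead]
    · rw [if_neg hc]
      rw [ih parts (buf ++ [c])]
      simp only [pvSplitB, if_neg hc, pvMapHead_comp]
      congr 1
      cases hps : pvSplitB cs with
      | nil => exact absurd hps (pvSplitB_ne_nil cs)
      | cons p ps => simp [pvMapHead]

-- ===== VERDICT (by name: the statement is the Claim_ definition above) =====
theorem split_csv_paths_py_spec : Claim_equal_split_csv_paths_py := by
  intro value _
  unfold Spec_split_csv_paths_py
  cases value with
  | none => rfl
  | some s =>
    by_cases hs : s = ""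
    · simp [split_csv_paths_py, split_csv_paths_py_alt, hs]
    · have hA : (PySem.Chars.splitOn (PySem.Chars.replace s.toList ['\n'] [';']) [';']).foldl
          (fun acc raw => acc ++ PySem.Chars.splitOn raw [',']) []
          = pvSplitB s.toList := by
        rw [PySem.List.foldl_append_eq_flatMap]
        rw [pvReplace_eq, pvSplitOn_eq]
        rw [List.flatMap_congr (fun raw _ => pvSplitOn_eq ',' raw)]
        simpa using pvFlat_eq s.toList
      have hB := pvScan_spec s.toList [] []
      simp only [List.nil_append, pvMapHead_id] at hB
      simp only [split_csv_paths_py, split_csv_paths_py_alt, if_neg hs, hA, hB]
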